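-- pv_equiv track=rewrite | github.com/y573082640/MengMa_DNA | coder.py | recover_seq
-- ===== SOURCE A (Python) =====
-- from collections import defaultdict
--
-- def recover_seq(mutated_seqs, cur_rec_seq=''):
--     # 假设4个碱基中只会发生一次突变
--     patterns = defaultdict(int)
--     for mutated_seq in mutated_seqs:
--         patterns[mutated_seq[:min(3, len(mutated_seq))]] += 1
--     max_count = max(patterns.values())
--     most_common_pattern = max(patterns, key=patterns.get)
--
--     min_len = min(map(len, mutated_seqs))
--     if min_len < 4 or len(most_common_pattern) < 3:
--         return cur_rec_seq + most_common_pattern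
--
--     common_patterns = [p for p in patterns.keys() if patterns[p] == max_count]
--     # 多条序列突变结果一致
--     if len(common_patterns) > 1:
--         common_patterns = [mutated_seq[:4] for mutated_seq in mutated_seqs if patterns[mutated_seq[:3]] == max_count]
--         # 多比较一位
--         Four_base_patterns = {cc: common_patterns.count(cc) for cc in common_patterns}
--         most_common_pattern = max(Four_base_patterns, key=Four_base_patterns.get)[:3]
--
--     rec_seq = []
--     # 三位碱基相同
--     if most_common_pattern in ['AAA', 'TTT', 'CCC', 'GGG']:
--         for mutated_seq in mutated_seqs:
--             # 可确认一对相邻碱基未突变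
--             if mutated_seq[:3] == most_common_pattern:
--                 rec_seq.append(mutated_seq[2:])
--             # 删除 / 末位突变，可在下一次递归中判断
--             elif mutated_seq[1] == most_common_pattern[1]:
--                 rec_seq.append(mutated_seq[1:])
--             # 插入
--             elif mutated_seq[2:4] == most_common_pattern[1:3]:
--                 rec_seq.append(mutated_seq[2:])
--             else:
--                 rec_seq.append(mutated_seq[2:])
--
--         return recover_seq(rec_seq, cur_rec_seq + most_common_pattern[:2])
--
--     else:
--         for mutated_seq in mutated_seqs:
--             middle_base = most_common_pattern[1]
--             if mutated_seq[:3] == most_common_pattern: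
--                 rec_seq.append(mutated_seq[1:])
--             else:
--                 if mutated_seq[1] == most_common_pattern[1]:
--                     rec_seq.append(mutated_seq[1:])
--                 # 中间位删除 -> 插入原来的中间位
--                 elif mutated_seq[1] == most_common_pattern[2]:
--                     rec_seq.append(middle_base + mutated_seq[1:])
--                 # 中间位突变 -> 替换原来的中间位
--                 elif mutated_seq[2] == most_common_pattern[2]:
--                     rec_seq.append(middle_base + mutated_seq[2:])
--                 # 插入 -> 跳过插入位
--                 elif mutated_seq[2: 4] == most_common_pattern[1:]:
--                     rec_seq.append(mutated_seq[2:])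
--                 else:
--                     rec_seq.append(mutated_seq[1:])
--         return recover_seq(rec_seq, cur_rec_seq + most_common_pattern[0])
-- ===== SOURCE B (Python) =====
-- from collections import Counter
--
-- def recover_seq(mutated_seqs, cur_rec_seq=''):
--     # Iterative rewrite: while-loop over (seqs, acc) instead of tail recursion,
--     # Counter instead of a defaultdict loop, tie detected by counting maximal
--     # values, per-read repair factored into mapped helper functions with the
--     # duplicate branches of the original chain merged.
--     seqs = list(mutated_seqs)
--     acc = cur_rec_seq
--     while True:
--         counts = Counter(s[:3] for s in seqs)
--         max_count = max(counts.values())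
--         pattern = max(counts, key=counts.get)
--         if min(len(s) for s in seqs) < 4 or len(pattern) < 3:
--             return acc + pattern
--         if list(counts.values()).count(max_count) > 1:
--             # tie on 3-prefixes: break it on the 4-prefixes of the tied reads
--             fours = Counter(s[:4] for s in seqs if counts[s[:3]] == max_count)
--             pattern = max(fours, key=fours.get)[:3]
--         if pattern in ('AAA', 'TTT', 'CCC', 'GGG'):
--             seqs = [s[1:] if (s[:3] != pattern and s[1] == pattern[1]) else s[2:]
--                     for s in seqs]
--             acc += pattern[:2]
--         else:
--             mid = pattern[1]
--
--             def fix(s):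
--                 if s[:3] == pattern or s[1] == pattern[1]:
--                     return s[1:]
--                 if s[1] == pattern[2]:
--                     return mid + s[1:]
--                 if s[2] == pattern[2]:
--                     return mid + s[2:]
--                 if s[2:4] == pattern[1:]:
--                     return s[2:]
--                 return s[1:]
--
--             seqs = [fix(s) for s in seqs]
--             acc += pattern[0]
-- ===== Notes on version B (the rewrite author's own statement) =====
-- stated objective: idiomatic
-- what changed: Replaces the tail recursion by an explicit while-loop over (seqs, acc), builds the prefix counts with collections.Counter instead of a defaultdict loop, detects the tie by counting maximal values instead of materialising the list of tied keys, and factors the per-read repair into mapped helper functions with the duplicate branches of the original if-chains merged.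
-- outside the precondition, e.g. on recover_seq([], ''): A raises ValueError, B raises ValueError
import Mathlib
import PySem

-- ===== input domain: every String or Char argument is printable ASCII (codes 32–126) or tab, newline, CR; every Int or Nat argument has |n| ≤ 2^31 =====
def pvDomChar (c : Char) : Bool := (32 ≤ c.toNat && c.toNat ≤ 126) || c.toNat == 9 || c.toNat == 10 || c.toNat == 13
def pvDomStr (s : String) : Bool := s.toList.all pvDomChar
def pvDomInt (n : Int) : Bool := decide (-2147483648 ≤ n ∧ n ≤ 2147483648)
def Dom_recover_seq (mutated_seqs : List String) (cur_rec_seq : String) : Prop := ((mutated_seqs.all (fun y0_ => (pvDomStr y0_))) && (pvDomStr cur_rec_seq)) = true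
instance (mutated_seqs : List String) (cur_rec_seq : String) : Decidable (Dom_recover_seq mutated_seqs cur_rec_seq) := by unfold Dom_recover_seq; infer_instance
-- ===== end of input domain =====

-- B rewrites A's tail recursion as an iterative loop with Counter-based counting,
-- a count-of-maximal-values tie test and mapped per-read repair helpers (objective:
-- simpler/idiomatic; same asymptotic cost).

-- ===== PORT A =====
-- Python s[i] used as a 1-character string (raises only where unreachable under the
-- guards of A; the `none` arm is never taken on executed paths).
def pyHead1 (s : String) (i : Int) : String :=
  match PySem.Str.pyGet? s i with
  | some c => String.singleton c
  | none => ""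

-- patterns = defaultdict(int); for s in seqs: patterns[s[:min(3,len(s))]] += 1
def patternsA (seqs : List String) : PySem.Dict String Int :=
  seqs.foldl
    (fun d s => d.modify (PySem.Str.slice s none (some (min 3 (PySem.Str.len s)))) 0 (· + 1))
    PySem.Dict.empty

-- Literal transliteration of A's recursion; the fuel only makes it total (each
-- recursive call strictly decreases the total length of the reads, so the seed
-- used by `recover_seq` suffices).  max()/min() of an empty collection (Python
-- ValueError, only for mutated_seqs = []) is excluded by Pre_.
def recover_seq_loop : Nat → List String → String → String
  | 0, _, cur_rec_seq => cur_rec_seq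
  | fuel+1, mutated_seqs, cur_rec_seq =>
    let patterns := patternsA mutated_seqs
    let max_count : Int := (PySem.List.max? patterns.values (fun v => v)).getD 0
    let most_common_pattern : String :=
      (PySem.List.max? patterns.keys (fun p => patterns.getD p 0)).getD ""
    let min_len : Int := (PySem.List.min? (mutated_seqs.map PySem.Str.len) (fun v => v)).getD 0
    if min_len < 4 ∨ PySem.Str.len most_common_pattern < 3 then
      cur_rec_seq ++ most_common_pattern
    else
      let common_patterns := patterns.keys.filter (fun p => patterns.getD p 0 == max_count)
      let most_common_pattern :=
        if common_patterns.length > 1 then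
          let common4 := (mutated_seqs.filter
              (fun s => patterns.getD (PySem.Str.slice s none (some 3)) 0 == max_count)).map
              (fun s => PySem.Str.slice s none (some 4))
          let four := common4.foldl
              (fun d cc => d.insert cc ((common4.count cc : Int))) PySem.Dict.empty
          PySem.Str.slice ((PySem.List.max? four.keys (fun p => four.getD p 0)).getD "")
            none (some 3)
        else most_common_pattern
      if most_common_pattern ∈ (["AAA", "TTT", "CCC", "GGG"] : List String) then
        let rec_seq := mutated_seqs.foldl (fun acc s =>
          if PySem.Str.slice s none (some 3) == most_common_pattern then
            acc ++ [PySem.Str.slice s (some 2) none]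
          else if PySem.Str.pyGet? s 1 == PySem.Str.pyGet? most_common_pattern 1 then
            acc ++ [PySem.Str.slice s (some 1) none]
          else if PySem.Str.slice s (some 2) (some 4) ==
              PySem.Str.slice most_common_pattern (some 1) (some 3) then
            acc ++ [PySem.Str.slice s (some 2) none]
          else
            acc ++ [PySem.Str.slice s (some 2) none]) []
        recover_seq_loop fuel rec_seq
          (cur_rec_seq ++ PySem.Str.slice most_common_pattern none (some 2))
      else
        let rec_seq := mutated_seqs.foldl (fun acc s =>
          if PySem.Str.slice s none (some 3) == most_common_pattern then
            acc ++ [PySem.Str.slice s (some 1) none]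
          else if PySem.Str.pyGet? s 1 == PySem.Str.pyGet? most_common_pattern 1 then
            acc ++ [PySem.Str.slice s (some 1) none]
          else if PySem.Str.pyGet? s 1 == PySem.Str.pyGet? most_common_pattern 2 then
            acc ++ [pyHead1 most_common_pattern 1 ++ PySem.Str.slice s (some 1) none]
          else if PySem.Str.pyGet? s 2 == PySem.Str.pyGet? most_common_pattern 2 then
            acc ++ [pyHead1 most_common_pattern 1 ++ PySem.Str.slice s (some 2) none]
          else if PySem.Str.slice s (some 2) (some 4) ==
              PySem.Str.slice most_common_pattern (some 1) none then
            acc ++ [PySem.Str.slice s (some 2) none]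
          else
            acc ++ [PySem.Str.slice s (some 1) none]) []
        recover_seq_loop fuel rec_seq (cur_rec_seq ++ pyHead1 most_common_pattern 0)

def recover_seq (mutated_seqs : List String) (cur_rec_seq : String) : String :=
  recover_seq_loop ((mutated_seqs.map String.length).sum + 1) mutated_seqs cur_rec_seq

-- ===== PORT B =====
def charAt (s : String) (i : Int) : String :=
  match PySem.Str.pyGet? s i with
  | some c => String.singleton c
  | none => ""

def prefix3 (s : String) : String := PySem.Str.slice s none (some 3)

def fixAAA (pattern : String) (s : String) : String :=
  if (PySem.Str.slice s none (some 3) != pattern) &&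
      (PySem.Str.pyGet? s 1 == PySem.Str.pyGet? pattern 1) then
    PySem.Str.slice s (some 1) none
  else
    PySem.Str.slice s (some 2) none

def fixMid (pattern : String) (s : String) : String :=
  if (PySem.Str.slice s none (some 3) == pattern) ||
      (PySem.Str.pyGet? s 1 == PySem.Str.pyGet? pattern 1) then
    PySem.Str.slice s (some 1) none
  else if PySem.Str.pyGet? s 1 == PySem.Str.pyGet? pattern 2 then
    charAt pattern 1 ++ PySem.Str.slice s (some 1) none
  else if PySem.Str.pyGet? s 2 == PySem.Str.pyGet? pattern 2 then
    charAt pattern 1 ++ PySem.Str.slice s (some 2) none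
  else if PySem.Str.slice s (some 2) (some 4) == PySem.Str.slice pattern (some 1) none then
    PySem.Str.slice s (some 2) none
  else
    PySem.Str.slice s (some 1) none

-- the while-True loop of Source B, fuel makes it total (same seed as port A)
def recover_seq_walk : Nat → List String → String → String
  | 0, _, acc => acc
  | fuel+1, seqs, acc =>
    let counts := PySem.Dict.counter (seqs.map prefix3)
    let max_count : Int := (PySem.List.max? counts.values (fun v => v)).getD 0
    let pattern := (PySem.List.max? counts.keys (fun p => counts.getD p 0)).getD ""
    if (PySem.List.min? (seqs.map PySem.Str.len) (fun v => v)).getD 0 < 4 ∨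
        PySem.Str.len pattern < 3 then
      acc ++ pattern
    else
      let pattern :=
        if counts.values.count max_count > 1 then
          let fours := PySem.Dict.counter
            ((seqs.filter (fun s => counts.getD (prefix3 s) 0 == max_count)).map
              (fun s => PySem.Str.slice s none (some 4)))
          PySem.Str.slice ((PySem.List.max? fours.keys (fun p => fours.getD p 0)).getD "")
            none (some 3)
        else pattern
      if pattern ∈ (["AAA", "TTT", "CCC", "GGG"] : List String) then
        recover_seq_walk fuel (seqs.map (fixAAA pattern))
          (acc ++ PySem.Str.slice pattern none (some 2))
      else
        recover_seq_walk fuel (seqs.map (fixMid pattern)) (acc ++ charAt pattern 0)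

def recover_seq_alt (mutated_seqs : List String) (cur_rec_seq : String) : String :=
  recover_seq_walk ((mutated_seqs.map String.length).sum + 1) mutated_seqs cur_rec_seq

-- ===== PRECONDITION & SPEC =====
-- Pre_ excludes only mutated_seqs = [], where Python's max() raises ValueError.
def Pre_recover_seq (mutated_seqs : List String) (cur_rec_seq : String) : Prop :=
  mutated_seqs ≠ []
instance (mutated_seqs : List String) (cur_rec_seq : String) :
    Decidable (Pre_recover_seq mutated_seqs cur_rec_seq) := by
  unfold Pre_recover_seq; infer_instance

def pvWitness_recover_seq : List String × String := (["ACGT", "AGT"], "")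

def Spec_recover_seq (mutated_seqs : List String) (cur_rec_seq : String) (out : String) : Prop :=
  out = recover_seq_alt mutated_seqs cur_rec_seq
instance (mutated_seqs : List String) (cur_rec_seq : String) (out : String) :
    Decidable (Spec_recover_seq mutated_seqs cur_rec_seq out) := by
  unfold Spec_recover_seq; infer_instance

-- ===== CLAIM (what is proved, stated in full; the proofs are below) =====
def Claim_equal_recover_seq : Prop := ∀ (mutated_seqs : List String) (cur_rec_seq : String), Dom_recover_seq mutated_seqs cur_rec_seq → Pre_recover_seq mutated_seqs cur_rec_seq → Spec_recover_seq mutated_seqs cur_rec_seq (recover_seq mutated_seqs cur_rec_seq)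

-- ===== LEMMAS AND PROOFS =====

-- s[:min(3, len(s))] = s[:3] (slices clamp)
theorem sliceMin3 (s : String) :
    PySem.Str.slice s none (some (min 3 (PySem.Str.len s))) = PySem.Str.slice s none (some 3) := by
  simp only [PySem.Str.slice, PySem.Chars.slice_eq_listSlice]
  rw [PySem.List.slice_to _ (by rw [PySem.Str.len_eq]; omega),
      PySem.List.slice_to _ (by norm_num)]
  have h : (min 3 (PySem.Str.len s)).toNat = min 3 s.toList.length := by
    simp [PySem.Str.len_eq]; omega
  rw [h, ← List.take_eq_take_min]
  rfl

-- A's defaultdict counting loop builds Counter(s[:3] for s in seqs)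
theorem patternsA_eq (seqs : List String) :
    patternsA seqs = PySem.Dict.counter (seqs.map prefix3) := by
  rw [← PySem.Dict.foldl_insert_getD_add_one_eq_counter, List.foldl_map]
  simp only [patternsA, PySem.Dict.modify, sliceMin3, prefix3]

-- value of a key-indexed dict comprehension
theorem getD_foldl_insert_const (l : List String) (C : String → Int)
    (d : PySem.Dict String Int) (k : String) (dflt : Int) :
    (l.foldl (fun d x => d.insert x (C x)) d).getD k dflt =
      if k ∈ l then C k else d.getD k dflt := by
  induction l generalizing d with
  | nil => simp
  | cons x l ih =>
    simp only [List.foldl_cons, ih, List.mem_cons]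
    by_cases hl : k ∈ l
    · simp [hl]
    · by_cases hx : k = x
      · simp [hx, PySem.Dict.getD_insert_self]
      · simp [hl, hx, PySem.Dict.getD_insert_of_ne _ _ _ hx]

-- {cc: l.count(cc) for cc in l} = Counter(l)
theorem dictcomp_eq_counter (l : List String) :
    l.foldl (fun d cc => d.insert cc ((l.count cc : Int))) PySem.Dict.empty =
      PySem.Dict.counter l := by
  apply PySem.Dict.ext
  have hnodup : (l.foldl (fun d cc => d.insert cc ((l.count cc : Int))) PySem.Dict.empty).keys.Nodup :=
    PySem.Dict.nodup_keys_foldl_insert l _ _ (by simp)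
  rw [PySem.Dict.items_eq_map_keys _ hnodup 0,
      PySem.Dict.items_eq_map_keys _ (PySem.Dict.nodup_keys_counter l) 0,
      PySem.Dict.keys_foldl_insert, PySem.Dict.keys_counter]
  have hkeys : PySem.Set.update (PySem.Dict.empty : PySem.Dict String Int).keys l =
      PySem.Set.ofList l := by
    simp [PySem.Dict.keys_empty, PySem.Set.update_nil_left]
  rw [hkeys]
  apply List.map_congr_left
  intro k hk
  have hkl : k ∈ l := (PySem.Set.mem_ofList _ _).1 hk
  rw [getD_foldl_insert_const, PySem.Dict.getD_counter]
  simp [hkl]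

-- the tie test: number of maximal keys = number of maximal values
theorem tie_counter (xs : List String) (m : Int) :
    ((PySem.Dict.counter xs).keys.filter
        (fun p => (PySem.Dict.counter xs).getD p 0 == m)).length =
      (PySem.Dict.counter xs).values.count m := by
  rw [PySem.Dict.values_eq_map_keys _ (PySem.Dict.nodup_keys_counter xs) 0,
      List.count_eq_countP, List.countP_map, ← List.countP_eq_length_filter]
  rfl

theorem charAt_eq_pyHead1 : charAt = pyHead1 := rfl

-- A's AAA repair loop is B's mapped fixAAA
theorem foldAAA_eq (p : String) (seqs : List String) :
    seqs.foldl (fun acc s =>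
      if PySem.Str.slice s none (some 3) == p then
        acc ++ [PySem.Str.slice s (some 2) none]
      else if PySem.Str.pyGet? s 1 == PySem.Str.pyGet? p 1 then
        acc ++ [PySem.Str.slice s (some 1) none]
      else if PySem.Str.slice s (some 2) (some 4) == PySem.Str.slice p (some 1) (some 3) then
        acc ++ [PySem.Str.slice s (some 2) none]
      else
        acc ++ [PySem.Str.slice s (some 2) none]) []
    = seqs.map (fixAAA p) := by
  have hf : (fun (acc : List String) (s : String) =>
      if PySem.Str.slice s none (some 3) == p then
        acc ++ [PySem.Str.slice s (some 2) none]
      else if PySem.Str.pyGet? s 1 == PySem.Str.pyGet? p 1 then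
        acc ++ [PySem.Str.slice s (some 1) none]
      else if PySem.Str.slice s (some 2) (some 4) == PySem.Str.slice p (some 1) (some 3) then
        acc ++ [PySem.Str.slice s (some 2) none]
      else
        acc ++ [PySem.Str.slice s (some 2) none]) =
      (fun acc s => acc ++ [fixAAA p s]) := by
    funext acc s
    simp only [fixAAA]
    split_ifs <;> simp_all
  rw [hf, PySem.List.foldl_append_singleton_eq_map, List.nil_append]

-- A's middle-base repair loop is B's mapped fixMid
theorem foldMid_eq (p : String) (seqs : List String) :
    seqs.foldl (fun acc s =>
      if PySem.Str.slice s none (some 3) == p then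
        acc ++ [PySem.Str.slice s (some 1) none]
      else if PySem.Str.pyGet? s 1 == PySem.Str.pyGet? p 1 then
        acc ++ [PySem.Str.slice s (some 1) none]
      else if PySem.Str.pyGet? s 1 == PySem.Str.pyGet? p 2 then
        acc ++ [pyHead1 p 1 ++ PySem.Str.slice s (some 1) none]
      else if PySem.Str.pyGet? s 2 == PySem.Str.pyGet? p 2 then
        acc ++ [pyHead1 p 1 ++ PySem.Str.slice s (some 2) none]
      else if PySem.Str.slice s (some 2) (some 4) == PySem.Str.slice p (some 1) none then
        acc ++ [PySem.Str.slice s (some 2) none]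
      else
        acc ++ [PySem.Str.slice s (some 1) none]) []
    = seqs.map (fixMid p) := by
  have hf : (fun (acc : List String) (s : String) =>
      if PySem.Str.slice s none (some 3) == p then
        acc ++ [PySem.Str.slice s (some 1) none]
      else if PySem.Str.pyGet? s 1 == PySem.Str.pyGet? p 1 then
        acc ++ [PySem.Str.slice s (some 1) none]
      else if PySem.Str.pyGet? s 1 == PySem.Str.pyGet? p 2 then
        acc ++ [pyHead1 p 1 ++ PySem.Str.slice s (some 1) none]
      else if PySem.Str.pyGet? s 2 == PySem.Str.pyGet? p 2 then
        acc ++ [pyHead1 p 1 ++ PySem.Str.slice s (some 2) none]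
      else if PySem.Str.slice s (some 2) (some 4) == PySem.Str.slice p (some 1) none then
        acc ++ [PySem.Str.slice s (some 2) none]
      else
        acc ++ [PySem.Str.slice s (some 1) none]) =
      (fun acc s => acc ++ [fixMid p s]) := by
    funext acc s
    simp only [fixMid, pyHead1, charAt]
    split_ifs <;> simp_all
  rw [hf, PySem.List.foldl_append_singleton_eq_map, List.nil_append]

-- the loop of B computes A's recursion, fuel for fuel
theorem loop_eq_walk (fuel : Nat) : ∀ (seqs : List String) (acc : String),
    recover_seq_loop fuel seqs acc = recover_seq_walk fuel seqs acc := by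
  induction fuel with
  | zero => intro seqs acc; rfl
  | succ f ih =>
    intro seqs acc
    simp only [recover_seq_loop, recover_seq_walk, patternsA_eq, tie_counter,
      dictcomp_eq_counter, foldAAA_eq, foldMid_eq, prefix3, charAt_eq_pyHead1, ih]

-- ===== VERDICT (by name: the statement is the Claim_ definition above) =====
theorem recover_seq_spec : Claim_equal_recover_seq := by
  intro mutated_seqs cur_rec_seq _ _
  unfold Spec_recover_seq recover_seq recover_seq_alt
  exact loop_eq_walk _ mutated_seqs cur_rec_seq
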